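-- pv_equiv track=rewrite | github.com/KiranK0304/agentic-trading-system | utils/market_context.py | _breadth_summary
-- ===== SOURCE A (Python) =====
-- from typing import Any
--
-- def _breadth_summary(index_rows: list[dict[str, Any]]) -> str:
--     up = down = nodata = 0
--     for row in index_rows:
--         q = row.get("quote")
--         if not q:
--             nodata += 1
--             continue
--         pct = q.get("percent_change")
--         if pct is None:
--             nodata += 1
--             continue
--         if pct >= 0:
--             up += 1
--         else:
--             down += 1
--     return f"indices_up={up}, indices_down={down}, indices_no_data={nodata}"
-- ===== SOURCE B (Python) =====
-- def _no_data(row):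
--     q = row.get("quote")
--     return not q or q.get("percent_change") is None
--
--
-- def _is_up(row):
--     q = row.get("quote")
--     return bool(q) and q.get("percent_change") is not None and q.get("percent_change") >= 0
--
--
-- def _breadth_summary(index_rows):
--     nodata = sum(1 for row in index_rows if _no_data(row))
--     up = sum(1 for row in index_rows if _is_up(row))
--     down = len(index_rows) - up - nodata
--     return f"indices_up={up}, indices_down={down}, indices_no_data={nodata}"
-- ===== Notes on version B (the rewrite author's own statement) =====
-- stated objective: simpler
-- what changed: Replaces A's single three-way branching accumulator loop with two independent predicate counts (no-data, up) and derives down = len - up - nodata by arithmetic.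
import Mathlib
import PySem

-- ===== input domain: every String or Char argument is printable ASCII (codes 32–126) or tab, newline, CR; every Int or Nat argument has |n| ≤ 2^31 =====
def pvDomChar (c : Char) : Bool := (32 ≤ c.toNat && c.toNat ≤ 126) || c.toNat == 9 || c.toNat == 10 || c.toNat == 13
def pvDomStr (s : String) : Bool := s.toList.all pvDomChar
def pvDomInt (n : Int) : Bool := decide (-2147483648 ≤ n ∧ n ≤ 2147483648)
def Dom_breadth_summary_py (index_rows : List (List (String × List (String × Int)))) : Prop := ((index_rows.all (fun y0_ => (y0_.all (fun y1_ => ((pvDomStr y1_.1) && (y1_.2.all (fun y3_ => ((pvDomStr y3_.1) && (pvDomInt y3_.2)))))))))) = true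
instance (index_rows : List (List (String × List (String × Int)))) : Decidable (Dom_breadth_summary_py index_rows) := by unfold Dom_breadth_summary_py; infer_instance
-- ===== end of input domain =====

-- B is 'simpler': two independent predicate scans plus 'down' derived by subtraction, instead of A's single three-way branching accumulator loop.

-- dict.get(k): first matching key in the association list (exact for Python dicts, whose keys are unique)
def pvGetA {α : Type} (d : List (String × α)) (k : String) : Option α :=
  (d.find? (·.1 == k)).map (·.2)

-- ===== PORT A =====
-- the loop body: three counters updated per row exactly as A's branches do
def pvStepA (s : Nat × Nat × Nat) (row : List (String × List (String × Int))) : Nat × Nat × Nat :=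
  match pvGetA row "quote" with
  | none => (s.1, s.2.1, s.2.2 + 1)              -- q is None → falsy → nodata += 1
  | some q =>
    if q.isEmpty then (s.1, s.2.1, s.2.2 + 1)    -- q == {} → falsy → nodata += 1
    else
      match pvGetA q "percent_change" with
      | none => (s.1, s.2.1, s.2.2 + 1)          -- pct is None → nodata += 1
      | some pct => if 0 ≤ pct then (s.1 + 1, s.2.1, s.2.2)
                    else (s.1, s.2.1 + 1, s.2.2)

def breadth_summary_py (index_rows : List (List (String × List (String × Int)))) : String :=
  let s := index_rows.foldl pvStepA (0, 0, 0)
  "indices_up=" ++ PySem.Int.toStr s.1 ++ ", indices_down=" ++ PySem.Int.toStr s.2.1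
    ++ ", indices_no_data=" ++ PySem.Int.toStr s.2.2

-- ===== PORT B =====
def pvNoData (row : List (String × List (String × Int))) : Bool :=
  match pvGetA row "quote" with
  | none => true
  | some q => q.isEmpty || (pvGetA q "percent_change").isNone

def pvIsUp (row : List (String × List (String × Int))) : Bool :=
  match pvGetA row "quote" with
  | none => false
  | some q => !q.isEmpty &&
      (match pvGetA q "percent_change" with
       | none => false
       | some pct => decide (0 ≤ pct))

def breadth_summary_py_alt (index_rows : List (List (String × List (String × Int)))) : String :=
  let nodata := index_rows.countP pvNoData
  let up := index_rows.countP pvIsUp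
  let down := index_rows.length - up - nodata
  "indices_up=" ++ PySem.Int.toStr up ++ ", indices_down=" ++ PySem.Int.toStr down
    ++ ", indices_no_data=" ++ PySem.Int.toStr nodata

-- ===== PRECONDITION & SPEC =====
def Spec_breadth_summary_py (index_rows : List (List (String × List (String × Int)))) (out : String) : Prop := out = breadth_summary_py_alt index_rows
instance (index_rows : List (List (String × List (String × Int)))) (out : String) : Decidable (Spec_breadth_summary_py index_rows out) := by unfold Spec_breadth_summary_py; infer_instance

-- ===== CLAIM (what is proved, stated in full; the proofs are below) =====
def Claim_equal_breadth_summary_py : Prop := ∀ (index_rows : List (List (String × List (String × Int)))), Dom_breadth_summary_py index_rows → Spec_breadth_summary_py index_rows (breadth_summary_py index_rows)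

-- ===== LEMMAS AND PROOFS =====

-- the 'down' branch fires exactly when the row is neither no-data nor up
def pvIsDown (row : List (String × List (String × Int))) : Bool := !pvNoData row && !pvIsUp row

lemma pvStepA_eq (s : Nat × Nat × Nat) (row : List (String × List (String × Int))) :
    pvStepA s row =
      (s.1 + (if pvIsUp row then 1 else 0),
       s.2.1 + (if pvIsDown row then 1 else 0),
       s.2.2 + (if pvNoData row then 1 else 0)) := by
  unfold pvStepA pvIsDown pvIsUp pvNoData
  cases h : pvGetA row "quote" with
  | none => simp
  | some q =>
    by_cases hq : q.isEmpty <;> simp [hq]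
    cases hp : pvGetA q "percent_change" with
    | none => simp
    | some pct => by_cases hpc : (0:Int) ≤ pct <;> simp [hpc]

lemma foldA_eq (l : List (List (String × List (String × Int)))) (u d n : Nat) :
    l.foldl pvStepA (u, d, n) = (u + l.countP pvIsUp, d + l.countP pvIsDown, n + l.countP pvNoData) := by
  induction l generalizing u d n with
  | nil => simp
  | cons row rest ih =>
    rw [List.foldl_cons, pvStepA_eq, ih]
    simp only [List.countP_cons]
    by_cases h1 : pvIsUp row <;> by_cases h2 : pvIsDown row <;> by_cases h3 : pvNoData row <;>
      simp [h1, h2, h3] <;> omega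

lemma pvNoData_false_of_isUp (row : List (String × List (String × Int))) (h : pvIsUp row = true) :
    pvNoData row = false := by
  unfold pvIsUp at h
  unfold pvNoData
  cases hq : pvGetA row "quote" with
  | none => simp [hq] at h
  | some q =>
    simp only [hq] at h ⊢
    cases hp : pvGetA q "percent_change" with
    | none => simp [hp] at h
    | some pct => simp [hp] at h ⊢; exact h.1

lemma count_partition (l : List (List (String × List (String × Int)))) :
    l.countP pvIsUp + l.countP pvIsDown + l.countP pvNoData = l.length := by
  induction l with
  | nil => simp
  | cons row rest ih =>
    simp only [List.countP_cons, List.length_cons]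
    simp only [pvIsDown] at ih ⊢
    by_cases h1 : pvIsUp row
    · have h3 := pvNoData_false_of_isUp row h1
      simp [h1, h3]; omega
    · by_cases h3 : pvNoData row <;> simp [h1, h3] <;> omega

-- ===== VERDICT (by name: the statement is the Claim_ definition above) =====
theorem breadth_summary_py_spec : Claim_equal_breadth_summary_py := by
  intro l _
  show breadth_summary_py l = breadth_summary_py_alt l
  unfold breadth_summary_py breadth_summary_py_alt
  rw [foldA_eq]
  have h := count_partition l
  simp only [Nat.zero_add]
  have hd : l.countP pvIsDown = l.length - l.countP pvIsUp - l.countP pvNoData := by omega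
  rw [hd]
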